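-- pv_equiv track=rewrite | github.com/BlueberryOreo/2021Python | 考试/11-23模拟考/gold.py | func5
-- ===== SOURCE A (Python) =====
-- def func5(Num):
--     if Num<=0:
--         return None
--     res=[]
--     temp=[int(i) for i in str(Num)]
--     res.append(len(temp))
--     res.append(sum(temp))
--     res.append(max(temp))
--     return res
-- ===== SOURCE B (Python) =====
-- def func5(Num):
--     if Num <= 0:
--         return None
--     n = Num
--     count = 0
--     total = 0
--     mx = 0
--     while n > 0:
--         d = n % 10
--         count += 1
--         total += d
--         if d > mx:
--             mx = d
--         n //= 10
--     return [count, total, mx]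
-- ===== Notes on version B (the rewrite author's own statement) =====
-- stated objective: alternative
-- what changed: Replaces the str(Num) conversion plus a digit list scanned three times (len/sum/max) by a single arithmetic divmod-by-10 loop that fuses count, sum and max into one pass with no string or list at all.
import Mathlib
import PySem

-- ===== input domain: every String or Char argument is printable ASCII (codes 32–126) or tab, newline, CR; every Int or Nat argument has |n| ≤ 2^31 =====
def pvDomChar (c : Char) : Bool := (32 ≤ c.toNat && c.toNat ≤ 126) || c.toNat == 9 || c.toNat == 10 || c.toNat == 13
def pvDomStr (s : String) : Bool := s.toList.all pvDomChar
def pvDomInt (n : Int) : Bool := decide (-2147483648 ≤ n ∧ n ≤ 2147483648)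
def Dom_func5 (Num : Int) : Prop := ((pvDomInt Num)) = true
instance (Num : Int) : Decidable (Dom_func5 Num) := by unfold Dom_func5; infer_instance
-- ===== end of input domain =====

-- B replaces str(Num) + a digit list scanned three times (len/sum/max) by one arithmetic
-- divmod-by-10 loop fusing count, sum and max (alternative decomposition, same cost).

-- ===== PORT A =====
-- temp = [int(i) for i in str(Num)]  (int of a one-char string via PySem.Int.ofChars?;
-- mapM: Python's int() would raise ValueError on a non-digit char — never reached here)
def func5 (Num : Int) : Option (List Int) :=
  if Num ≤ 0 then none
  else
    match (PySem.Int.toStr Num).toList.mapM (fun c => PySem.Int.ofChars? [c]) with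
    | none => none
    | some temp =>
      -- res.append(len(temp)); res.append(sum(temp)); res.append(max(temp))
      match PySem.List.max? temp (fun x => x) with
      | none => none   -- max([]) ValueError — unreachable, str(Num) is nonempty
      | some m => some [(temp.length : Int), temp.sum, m]

-- ===== PORT B =====
-- the while-loop of Source B; n stays positive, so it is tracked as a Nat (n % 10, n // 10
-- on a nonnegative int coincide exactly with Nat mod / div)
def func5AltLoop (n : Nat) (count total mx : Int) : Int × Int × Int :=
  if n = 0 then (count, total, mx)
  else
    let d : Int := Int.ofNat (n % 10)
    func5AltLoop (n / 10) (count + 1) (total + d) (if d > mx then d else mx)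
termination_by n
decreasing_by exact Nat.div_lt_self (Nat.pos_of_ne_zero (by assumption)) (by norm_num)

def func5_alt (Num : Int) : Option (List Int) :=
  if Num ≤ 0 then none
  else
    match func5AltLoop Num.toNat 0 0 0 with
    | (c, s, m) => some [c, s, m]

-- ===== PRECONDITION & SPEC =====
def Spec_func5 (Num : Int) (out : Option (List Int)) : Prop := out = func5_alt Num
instance (Num : Int) (out : Option (List Int)) : Decidable (Spec_func5 Num out) := by unfold Spec_func5; infer_instance

-- ===== CLAIM (what is proved, stated in full; the proofs are below) =====
def Claim_equal_func5 : Prop := ∀ (Num : Int), Dom_func5 Num → Spec_func5 Num (func5 Num)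

-- ===== LEMMAS AND PROOFS =====

-- Nat.toDigits produces the base-10 digits (big-endian) for a positive number
lemma pv_toDigitsCore_eq : ∀ (f n : Nat) (l : List Char), 0 < n → n < f →
    Nat.toDigitsCore 10 f n l = ((Nat.digits 10 n).map Nat.digitChar).reverse ++ l := by
  intro f
  induction f with
  | zero => intro n l h1 h2; omega
  | succ f ih =>
    intro n l h1 h2
    rw [Nat.toDigitsCore]
    by_cases h : n / 10 = 0
    · have hd : Nat.digits 10 n = [n % 10] := by
        rw [Nat.digits_def' (by norm_num) h1, h]; simp
      simp [h, hd]
    · have hpos : 0 < n / 10 := Nat.pos_of_ne_zero h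
      have hlt : n / 10 < f :=
        lt_of_lt_of_le (Nat.div_lt_self h1 (by norm_num)) (Nat.lt_succ_iff.mp h2)
      rw [if_neg h, ih (n / 10) _ hpos hlt, Nat.digits_def' (by norm_num) h1]
      simp

lemma pv_toDigits_eq (n : Nat) (h : 0 < n) :
    Nat.toDigits 10 n = ((Nat.digits 10 n).map Nat.digitChar).reverse := by
  rw [Nat.toDigits, pv_toDigitsCore_eq (n + 1) n [] h (Nat.lt_succ_self n)]
  simp

lemma pv_ofChars_digitChar (d : Nat) (h : d < 10) :
    PySem.Int.ofChars? [Nat.digitChar d] = some (Int.ofNat d) := by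
  interval_cases d <;> decide

lemma pv_mapM_digits : ∀ (ds : List Nat), (∀ d ∈ ds, d < 10) →
    (ds.map Nat.digitChar).mapM (fun c => PySem.Int.ofChars? [c]) =
      some (ds.map (fun d => Int.ofNat d)) := by
  intro ds
  induction ds with
  | nil => intro _; rfl
  | cons d t ih =>
    intro h
    simp only [List.map_cons, List.mapM_cons,
      pv_ofChars_digitChar d (h d (by simp)), ih (fun x hx => h x (by simp [hx]))]
    rfl

lemma pv_foldl_max_comm : ∀ (l : List Int) (a b : Int),
    List.foldl max (max a b) l = max a (List.foldl max b l) := by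
  intro l
  induction l with
  | nil => intro a b; rfl
  | cons x t ih =>
    intro a b
    simp only [List.foldl_cons]
    rw [max_assoc, ih]

lemma pv_foldl_max_reverse : ∀ (l : List Int) (b : Int),
    List.foldl max b l.reverse = List.foldl max b l := by
  intro l
  induction l with
  | nil => intro b; rfl
  | cons x t ih =>
    intro b
    rw [List.reverse_cons, List.foldl_append, List.foldl_cons, List.foldl_nil, ih,
      List.foldl_cons, max_comm b x, pv_foldl_max_comm, max_comm]

lemma pv_max?_cons : ∀ (t : List Int) (a : Int),
    PySem.List.max? (a :: t) (fun x => x) = some (List.foldl max a t) := by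
  intro t
  induction t with
  | nil => intro a; rfl
  | cons x t ih =>
    intro a
    have step : PySem.List.max? (a :: x :: t) (fun y => y) =
        PySem.List.max? (max a x :: t) (fun y => y) := by
      simp only [PySem.List.max?, List.foldl_cons]
      rcases lt_or_ge a x with h | h
      · rw [if_pos h, max_eq_right h.le]
      · rw [if_neg (not_lt.mpr h), max_eq_left h]
    rw [step, ih, List.foldl_cons]

-- characterisation of B's fused loop via the little-endian digit list
lemma pv_loop_eq : ∀ (n : Nat) (c s m : Int), func5AltLoop n c s m =
    (c + (Nat.digits 10 n).length,
     s + ((Nat.digits 10 n).map (fun d => Int.ofNat d)).sum,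
     ((Nat.digits 10 n).map (fun d => Int.ofNat d)).foldl max m) := by
  intro n
  induction n using Nat.strong_induction_on with
  | _ n ih =>
    intro c s m
    rw [func5AltLoop]
    by_cases h : n = 0
    · simp [h]
    · have hpos : 0 < n := Nat.pos_of_ne_zero h
      rw [if_neg h, ih (n / 10) (Nat.div_lt_self hpos (by norm_num)),
        Nat.digits_def' (by norm_num : (1:Nat) < 10) hpos]
      simp only [List.map_cons, List.length_cons, List.sum_cons, List.foldl_cons]
      refine Prod.ext ?_ (Prod.ext ?_ ?_)
      · push_cast; ring
      · push_cast; ring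
      · have : (if (Int.ofNat (n % 10)) > m then (Int.ofNat (n % 10)) else m)
            = max m (Int.ofNat (n % 10)) := by
          rcases lt_or_ge m (Int.ofNat (n % 10)) with hlt | hge
          · rw [if_pos hlt, max_eq_right hlt.le]
          · rw [if_neg (not_lt.mpr hge), max_eq_left hge]
        rw [this]

-- ===== VERDICT (by name: the statement is the Claim_ definition above) =====
theorem func5_spec : Claim_equal_func5 := by
  intro Num _
  unfold Spec_func5 func5 func5_alt
  by_cases hle : Num ≤ 0
  · simp [hle]
  · rw [if_neg hle, if_neg hle]
    have hpos : 0 < Num := lt_of_not_ge hle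
    have hnpos : 0 < Num.toNat := by omega
    set ds := Nat.digits 10 Num.toNat with hds
    have hne : ds ≠ [] := Nat.digits_ne_nil_iff_ne_zero.mpr (by omega)
    have hlt10 : ∀ d ∈ ds, d < 10 := fun d hd => Nat.digits_lt_base (by norm_num) hd
    -- A's character list is the big-endian digit string
    have hchars : (PySem.Int.toStr Num).toList = (ds.map Nat.digitChar).reverse := by
      rw [PySem.Int.toList_toStr, PySem.Int.toChars, if_neg (by omega : ¬ Num < 0),
        pv_toDigits_eq Num.toNat hnpos]
    have hrev : (ds.reverse.map Nat.digitChar) = (ds.map Nat.digitChar).reverse := by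
      simp
    have hmapM2 : (PySem.Int.toStr Num).toList.mapM (fun c => PySem.Int.ofChars? [c]) =
        some ((ds.map (fun d => Int.ofNat d)).reverse) := by
      rw [hchars, ← hrev, pv_mapM_digits ds.reverse (fun d hd => hlt10 d (List.mem_reverse.mp hd)),
        List.map_reverse]
    -- the reversed cast digit list, nonempty
    set D : List Int := ds.map (fun d => Int.ofNat d) with hD
    have hDmne : D ≠ [] := by
      rw [hD]; exact fun hc => hne (List.map_eq_nil_iff.mp hc)
    have hDne : D.reverse ≠ [] := fun hc => hDmne (List.reverse_eq_nil_iff.mp hc)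
    obtain ⟨a, t, hat⟩ := List.exists_cons_of_ne_nil hDne
    have ha_nonneg : 0 ≤ a := by
      have : a ∈ D.reverse := by rw [hat]; simp
      rw [List.mem_reverse, hD] at this
      obtain ⟨d, _, rfl⟩ := List.mem_map.mp this
      exact Int.natCast_nonneg d
    have hmax : PySem.List.max? D.reverse (fun x => x) = some (D.foldl max 0) := by
      rw [hat, pv_max?_cons, ← pv_foldl_max_reverse D 0, hat, List.foldl_cons,
        max_eq_right ha_nonneg]
    rw [hmapM2]
    dsimp only
    rw [hmax]
    dsimp only
    rw [pv_loop_eq]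
    simp [hD, List.sum_reverse]
    exact ⟨rfl, rfl, rfl⟩
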